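/-
  REACHABILITY THAT REMEMBERS THE WAY.

  `User.Reach L μ u P` (X86/Derived/User/Step.lean) says "some number of instructions from `u` ends in a state satisfying `P`"
  and hides the states in between. A safety statement ("the run never is at `__asan_report`") is about exactly those states.

      ReachVia L μ I u P     some number of instructions from `u` ends in a state satisfying `P`, and EVERY STATE FROM WHICH AN
                             INSTRUCTION IS TAKEN on the way (the first one, `u`, included; the last one, in `P`, not) satisfies `I`

  It has the API of `Reach` (done / step / trans / mono / loop), so that a walker written for `Reach` can target it: the only
  new obligation is `I v` at every state `v` that is stepped from. Added: `weaken` (a weaker invariant), `of_reach` / `to_reach`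
  (`I = True` is `Reach`).

  THE SOUNDNESS THEOREM (the analogue of `User.Reach.sound`):

      ReachVia.sound     Abs L m u → ReachVia L μ I u P →
                           ∃ k m' u', run (decoder μ) m k = .next m' ∧ Abs L m' u' ∧ P u' ∧ m'.sysPart = m.sysPart
                             ∧ ∀ j, j < k → ∃ mj uj, run (decoder μ) m j = .next mj ∧ Abs L mj uj ∧ I uj

  `X86.run` is a function, so "∃ mj" is "the" j-th machine; for an invariant that looks at RIP only, `ReachVia.sound_rip` says it
  about the full machine's own `rip`, with no user state left in the statement:

      ReachVia.sound_rip   … ∧ ∀ j, j < k → ∀ mj, run (decoder μ) m j = .next mj → J mj.rip          (I u := J u.rip)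
-/
import X86.Derived.User.Step
namespace X86
namespace User

variable {L : Layout} {μ : Microarch}

/-- **Some number of instructions, every state on the way in `I`**: the least predicate closed under "`P` holds" and
"`I` holds and one instruction leads into it". `I` is asked of every state an instruction is taken from, not of the final one. -/
def ReachVia (L : Layout) (μ : Microarch) (I : State → Prop) (u : State) (P : State → Prop) : Prop :=
  ∀ R : State → Prop, (∀ v, P v → R v) → (∀ v, I v → Step L μ v R → R v) → R u

namespace ReachVia
variable {I I' : State → Prop} {u : State} {P Q : State → Prop}

/-- No instruction: `P` holds already. (Nothing is asked of `I`.) -/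
theorem done (h : P u) : ReachVia L μ I u P :=
  fun _ hd _ => hd u h

/-- One instruction, taken from a state in `I`, then the rest. -/
theorem step (hi : I u) (h : Step L μ u (fun u' => ReachVia L μ I u' P)) : ReachVia L μ I u P :=
  fun R hd hs => hs u hi (h.mono fun _ hv => hv R hd hs)

/-- Runs compose: the states of both parts are in `I`. -/
theorem trans (h1 : ReachVia L μ I u P) (h2 : ∀ v, P v → ReachVia L μ I v Q) : ReachVia L μ I u Q :=
  h1 (fun v => ReachVia L μ I v Q) h2 (fun _ hi hv => step hi hv)

/-- A weaker postcondition. -/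
theorem mono (h1 : ReachVia L μ I u P) (h2 : ∀ v, P v → Q v) : ReachVia L μ I u Q :=
  h1.trans fun v hp => done (h2 v hp)

/-- **A weaker invariant.** -/
theorem weaken (h : ReachVia L μ I u P) (hi : ∀ v, I v → I' v) : ReachVia L μ I' u P :=
  fun R hd hs => h R hd (fun v hv hstep => hs v (hi v hv) hstep)

/-- `ReachVia` forgets to `Reach`. -/
theorem to_reach (h : ReachVia L μ I u P) : Reach L μ u P :=
  fun R hd hs => h R hd (fun v _ hstep => hs v hstep)

/-- `Reach` is `ReachVia` with the invariant that always holds. -/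
theorem of_reach (h : Reach L μ u P) : ReachVia L μ (fun _ => True) u P :=
  fun R hd hs => h R hd (fun v hstep => hs v True.intro hstep)

theorem iff_reach : ReachVia L μ (fun _ => True) u P ↔ Reach L μ u P :=
  ⟨to_reach, of_reach⟩

/-- **Loops**: an invariant and a variant give reachability of the exit; the states of every round are in `I`. -/
theorem loop {Inv Post : State → Prop} (measure : State → Nat)
    (body : ∀ v, Inv v → ReachVia L μ I v (fun v' => Post v' ∨ (Inv v' ∧ measure v' < measure v))) :
    ∀ v, Inv v → ReachVia L μ I v Post := by
  intro v
  induction hk : measure v using Nat.strongRecOn generalizing v with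
  | _ k ih =>
    intro hinv
    refine (body v hinv).trans ?_
    intro v' h
    rcases h with hp | ⟨hinv', hlt⟩
    · exact done hp
    · exact ih (measure v') (hk ▸ hlt) v' rfl hinv'

end ReachVia

/-! ### Soundness -/

/-- What `ReachVia.sound` concludes about one full machine `m`: a run of `k` steps to a machine in the relation with a state
in `P`, the system part kept, and every machine before the `k`-th in the relation with a state in `I`. -/
def RunsVia (L : Layout) (μ : Microarch) (I P : State → Prop) (m : Machine) : Prop :=
  ∃ k m' u', run (decoder μ) m k = .next m' ∧ Abs L m' u' ∧ P u' ∧ m'.sysPart = m.sysPart ∧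
    ∀ j, j < k → ∃ mj uj, run (decoder μ) m j = .next mj ∧ Abs L mj uj ∧ I uj

/-- **MANY STEPS, WITH THE WAY.** If the full machine `m` is in the relation with `u` and the flat machine reaches `P` from `u`
through states in `I`, then `X86.run` takes `m`, in some number `k` of steps, to a machine in the relation with a state in `P`,
and each of the machines after `0, 1, …, k - 1` steps is in the relation with a state in `I`. -/
theorem ReachVia.sound {I : State → Prop} {m : Machine} {u : State} {P : State → Prop}
    (h : Abs L m u) (hr : ReachVia L μ I u P) :
    ∃ k m' u', run (decoder μ) m k = .next m' ∧ Abs L m' u' ∧ P u' ∧ m'.sysPart = m.sysPart ∧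
      ∀ j, j < k → ∃ mj uj, run (decoder μ) m j = .next mj ∧ Abs L mj uj ∧ I uj := by
  let R : State → Prop := fun v => ∀ m, Abs L m v → RunsVia L μ I P m
  have hdone : ∀ v, P v → R v := by
    intro v hp m hm
    refine ⟨0, m, v, rfl, hm, hp, rfl, ?_⟩
    intro j hj
    exact absurd hj (Nat.not_lt_zero j)
  have hstep : ∀ v, I v → Step L μ v R → R v := by
    intro v hiv hsv m hm
    obtain ⟨m1, u1, h1, ha1, hr1, hs1⟩ := hsv.sound hm
    obtain ⟨k, m2, u2, h2, ha2, hp2, hs2, hvia⟩ := hr1 m1 ha1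
    refine ⟨k + 1, m2, u2, ?_, ha2, hp2, hs2.trans hs1, ?_⟩
    · simp only [run, h1]
      exact h2
    · intro j hj
      cases j with
      | zero => exact ⟨m, v, rfl, hm, hiv⟩
      | succ j =>
        obtain ⟨mj, uj, hrun, haj, hij⟩ := hvia j (Nat.lt_of_succ_lt_succ hj)
        refine ⟨mj, uj, ?_, haj, hij⟩
        simp only [run, h1]
        exact hrun
  exact hr R hdone hstep m h

/-- **The same for an invariant of RIP alone, said of the machine itself.** `X86.run` is a function: whatever machine the run
has reached after `j < k` steps, its `rip` satisfies `J` — no user state in the conclusion. This is the shape of the end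
theorem ("the run is never at `__asan_report`"). -/
theorem ReachVia.sound_rip {J : Word → Prop} {m : Machine} {u : State} {P : State → Prop}
    (h : Abs L m u) (hr : ReachVia L μ (fun v => J v.rip) u P) :
    ∃ k m' u', run (decoder μ) m k = .next m' ∧ Abs L m' u' ∧ P u' ∧ m'.sysPart = m.sysPart ∧
      ∀ j, j < k → ∀ mj, run (decoder μ) m j = .next mj → J mj.rip := by
  obtain ⟨k, m', u', hrun, ha, hp, hs, hvia⟩ := hr.sound h
  refine ⟨k, m', u', hrun, ha, hp, hs, ?_⟩
  intro j hj mj hmj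
  obtain ⟨mj', uj, hrun', haj, hij⟩ := hvia j hj
  rw [hmj] at hrun'
  have e : mj = mj' := StepResult.next.inj hrun'
  rw [e, haj.rip]
  exact hij

/-- The final machine's `rip`, for a postcondition that fixes RIP: `Abs` transports it. -/
theorem Abs.rip_of {m : Machine} {u : State} {a : Word} (h : Abs L m u) (hu : u.rip = a) : m.rip = a :=
  h.rip.trans hu

end User
end X86
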